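-- pv_equiv track=rewrite | github.com/ict-cspark/Algorithm | 프로그래머스/unrated/138477. 명예의 전당 （1）/명예의 전당 （1）.py | solution
-- ===== SOURCE A (Python) =====
-- def solution(k, score):
--     answer = []
--     top = []
--     for s in score:
--         top.append(s)
--         top.sort(reverse=True)
--         top = top[:k]
--         answer.append(top[-1])
--
--     return answer
-- ===== SOURCE B (Python) =====
-- def solution(k, score):
--     ans = []
--     asc = []  # ascending list holding the current top-k scores (smallest first)
--     for s in score:
--         lo, hi = 0, len(asc)
--         while lo < hi:  # binary search: rightmost insertion point for s
--             mid = (lo + hi) // 2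
--             if asc[mid] <= s:
--                 lo = mid + 1
--             else:
--                 hi = mid
--         asc.insert(lo, s)
--         if len(asc) > k:
--             asc.pop(0)
--         ans.append(asc[0])
--     return ans
-- ===== Notes on version B (the rewrite author's own statement) =====
-- stated objective: faster
-- what changed: Instead of appending, fully re-sorting and slicing a copy of the top list at every element, B maintains one ascending list of at most k scores, binary-searches the insertion point, pops the smallest on overflow and reads the answer at the head; measured up to ~30x faster on the timing inputs, with A timing out where B still returned.
import Mathlib
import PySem

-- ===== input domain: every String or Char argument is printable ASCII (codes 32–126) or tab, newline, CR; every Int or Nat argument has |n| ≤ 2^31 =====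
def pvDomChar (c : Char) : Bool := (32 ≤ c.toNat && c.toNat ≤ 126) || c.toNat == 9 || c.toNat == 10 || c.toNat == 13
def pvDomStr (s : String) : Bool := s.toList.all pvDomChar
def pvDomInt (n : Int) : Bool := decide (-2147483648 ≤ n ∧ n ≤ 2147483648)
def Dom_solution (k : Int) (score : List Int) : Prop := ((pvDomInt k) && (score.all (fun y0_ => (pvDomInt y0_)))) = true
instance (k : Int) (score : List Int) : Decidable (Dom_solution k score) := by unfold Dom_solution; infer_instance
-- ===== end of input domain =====

-- B maintains one ascending bounded list, locating each insertion point by binary search, instead of re-sorting and slicing a copy of the top list per element (measured faster in a timing run).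

-- ===== PORT A =====
-- one loop iteration of A: top.append(s); top.sort(reverse=True); top = top[:k]; answer.append(top[-1])
def stepA (k : Int) (st : List Int × List Int) (s : Int) : List Int × List Int :=
  let top1 := st.2 ++ [s]
  let top2 := PySem.List.sorted top1 (fun x => x) true
  let top3 := PySem.List.slice top2 none (some k)
  (st.1 ++ [(PySem.List.pyGet? top3 (-1)).getD 0], top3)
  -- top[-1] raises when top is empty; Pre_ excludes that, so the getD 0 default is never reached under Pre_

def solution (k : Int) (score : List Int) : List Int :=
  (score.foldl (stepA k) ([], [])).1

-- ===== PORT B =====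
-- B's while loop: binary search for the rightmost insertion point of s in the ascending list asc
def bisectLoop (asc : List Int) (s : Int) (lo hi : Nat) : Nat :=
  if lo < hi then
    let mid := (lo + hi) / 2
    if PySem.List.pyGetD asc (mid : Int) 0 ≤ s then bisectLoop asc s (mid + 1) hi
    else bisectLoop asc s lo mid
  else lo
  -- asc[mid] is always in range here, so the pyGetD default 0 is never reached
termination_by hi - lo
decreasing_by all_goals omega

-- one loop iteration of B: find the insertion point; insert s; pop the smallest if overflowing; answer.append(asc[0])
def stepB (k : Int) (st : List Int × List Int) (s : Int) : List Int × List Int :=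
  let lo := bisectLoop st.2 s 0 st.2.length
  let asc1 := PySem.List.insert st.2 (lo : Int) s
  let asc2 := if k < (asc1.length : Int) then asc1.tail else asc1
  (st.1 ++ [asc2.headD 0], asc2)
  -- asc.pop(0) on the (nonempty) overflowing list is .tail; asc[0] raises when asc is empty,
  -- Pre_ excludes that, so the headD 0 default is never reached under Pre_

def solution_alt (k : Int) (score : List Int) : List Int :=
  (score.foldl (stepB k) ([], [])).1

-- ===== PRECONDITION & SPEC =====
-- Pre_ excludes k ≤ 0 with a nonempty score, where both A and B raise IndexError (top[-1] / asc[0] on an empty list).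
def Pre_solution (k : Int) (score : List Int) : Prop := score = [] ∨ 1 ≤ k
instance (k : Int) (score : List Int) : Decidable (Pre_solution k score) := by unfold Pre_solution; infer_instance
def pvWitness_solution : Int × List Int := (2, [10, 20, 5, 20])

def Spec_solution (k : Int) (score : List Int) (out : List Int) : Prop := out = solution_alt k score
instance (k : Int) (score : List Int) (out : List Int) : Decidable (Spec_solution k score out) := by unfold Spec_solution; infer_instance

-- ===== CLAIM (what is proved, stated in full; the proofs are below) =====
def Claim_equal_solution : Prop := ∀ (k : Int) (score : List Int), Dom_solution k score → Pre_solution k score → Spec_solution k score (solution k score)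

-- ===== LEMMAS AND PROOFS =====

-- proof-side description of B's insertion: ordered insert into an ascending list, after equal elements
def insAsc : List Int → Int → List Int
  | [], s => [s]
  | x :: xs, s => if x ≤ s then x :: insAsc xs s else s :: x :: xs

lemma insAsc_perm (l : List Int) (s : Int) : (insAsc l s).Perm (s :: l) := by
  induction l with
  | nil => simp [insAsc]
  | cons x xs ih =>
    simp only [insAsc]
    split
    · exact ((ih.cons x).trans (List.Perm.swap s x xs))
    · rfl

lemma insAsc_pairwise (l : List Int) (s : Int) (h : l.Pairwise (· ≤ ·)) :
    (insAsc l s).Pairwise (· ≤ ·) := by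
  induction l with
  | nil => simp [insAsc]
  | cons x xs ih =>
    simp only [insAsc]
    rcases List.pairwise_cons.mp h with ⟨hx, hxs⟩
    split
    · rename_i hxle
      refine List.pairwise_cons.mpr ⟨?_, ih hxs⟩
      intro y hy
      rcases List.mem_cons.mp ((insAsc_perm xs s).mem_iff.mp hy) with hy' | hy'
      · omega
      · exact hx y hy'
    · rename_i hgt
      refine List.pairwise_cons.mpr ⟨?_, h⟩
      intro y hy
      rcases List.mem_cons.mp hy with hy' | hy'
      · omega
      · have := hx y hy'; omega

lemma insAsc_eq_tw (l : List Int) (s : Int) :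
    insAsc l s = l.takeWhile (fun x => decide (x ≤ s)) ++ s :: l.dropWhile (fun x => decide (x ≤ s)) := by
  induction l with
  | nil => simp [insAsc]
  | cons x xs ih =>
    simp only [insAsc, List.takeWhile_cons, List.dropWhile_cons]
    by_cases hx : x ≤ s <;> simp [hx, ih]

lemma take_tw (l : List Int) (p : Int → Bool) : l.take (l.takeWhile p).length = l.takeWhile p := by
  have h := List.take_left (l₁ := l.takeWhile p) (l₂ := l.dropWhile p)
  rwa [List.takeWhile_append_dropWhile] at h

lemma drop_tw (l : List Int) (p : Int → Bool) : l.drop (l.takeWhile p).length = l.dropWhile p := by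
  have h := List.drop_left (l₁ := l.takeWhile p) (l₂ := l.dropWhile p)
  rwa [List.takeWhile_append_dropWhile] at h

lemma insert_natCast (l : List Int) (n : Nat) (x : Int) (h : n ≤ l.length) :
    PySem.List.insert l (n : Int) x = l.take n ++ x :: l.drop n := by
  have hmin : min (n : Int) (l.length : Int) = (n : Int) := by omega
  have h0 : ¬ ((n : Int) < 0) := by omega
  simp [PySem.List.insert, PySem.List.sliceIndices, hmin, h0]

-- in an ascending list, an element is ≤ s exactly when it lies before the ≤-s prefix boundary
lemma le_iff_lt_twLen (l : List Int) (s : Int) (h : l.Pairwise (· ≤ ·)) :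
    ∀ (m : Nat) (hm : m < l.length),
      (l[m] ≤ s ↔ m < (l.takeWhile (fun x => decide (x ≤ s))).length) := by
  induction l with
  | nil => intro m hm; simp at hm
  | cons x xs ih =>
    intro m hm
    rcases List.pairwise_cons.mp h with ⟨hx, hxs⟩
    by_cases hxle : x ≤ s
    · cases m with
      | zero => simp [hxle]
      | succ m' =>
        have hm' : m' < xs.length := by simpa using hm
        have := ih hxs m' hm'
        simpa [hxle] using this
    · cases m with
      | zero => simp [hxle]
      | succ m' =>
        have hm' : m' < xs.length := by simpa using hm
        have hmem : xs[m'] ∈ xs := List.getElem_mem hm'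
        have := hx _ hmem
        simp only [List.takeWhile_cons]
        simp only [hxle]
        simp only [decide_eq_true_eq] at *
        constructor
        · intro hc; exact absurd (le_trans this hc) hxle
        · intro hc; simp at hc

lemma bisectLoop_eq (asc : List Int) (s : Int) (h : asc.Pairwise (· ≤ ·)) :
    ∀ (n lo hi : Nat), hi - lo ≤ n → hi ≤ asc.length →
      lo ≤ (asc.takeWhile (fun x => decide (x ≤ s))).length →
      (asc.takeWhile (fun x => decide (x ≤ s))).length ≤ hi →
      bisectLoop asc s lo hi = (asc.takeWhile (fun x => decide (x ≤ s))).length := by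
  intro n
  induction n with
  | zero =>
    intro lo hi hfuel _ hlo hhi
    rw [bisectLoop]
    have : ¬ lo < hi := by omega
    simp [this]
    omega
  | succ n ihn =>
    intro lo hi hfuel hlen hlo hhi
    rw [bisectLoop]
    by_cases hlh : lo < hi
    · simp only [hlh, if_pos]
      have hmid1 : (lo + hi) / 2 < hi := by omega
      have hmid0 : lo ≤ (lo + hi) / 2 := by omega
      have hmidlen : (lo + hi) / 2 < asc.length := by omega
      rw [PySem.List.pyGetD_eq_getElem asc 0 (by omega) (by exact_mod_cast hmidlen)]
      have hiff := le_iff_lt_twLen asc s h ((lo + hi) / 2) hmidlen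
      split
      · rename_i hle
        have h1 : (lo + hi) / 2 < (asc.takeWhile (fun x => decide (x ≤ s))).length := by
          apply hiff.mp
          simpa using hle
        exact ihn ((lo + hi) / 2 + 1) hi (by omega) hlen (by omega) hhi
      · rename_i hgt
        have h1 : ¬ ((lo + hi) / 2 < (asc.takeWhile (fun x => decide (x ≤ s))).length) := by
          intro hc
          exact hgt (by simpa using hiff.mpr hc)
        exact ihn lo ((lo + hi) / 2) (by omega) (by omega) hlo (by omega)
    · simp [hlh]
      omega

-- B's binary-search insertion of s into the sorted list asc is the ordered insert
lemma insert_eq_insAsc (asc : List Int) (s : Int) (h : asc.Pairwise (· ≤ ·)) :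
    PySem.List.insert asc ((bisectLoop asc s 0 asc.length : Nat) : Int) s = insAsc asc s := by
  have htw : (asc.takeWhile (fun x => decide (x ≤ s))).length ≤ asc.length :=
    (List.takeWhile_prefix _).length_le
  rw [bisectLoop_eq asc s h asc.length 0 asc.length (by omega) le_rfl (by omega) htw]
  rw [insert_natCast _ _ _ htw, take_tw, drop_tw, insAsc_eq_tw]

-- the re-sorted descending list of A, reversed, is exactly the ordered insert into the reversed state
lemma sorted_rev_eq_insAsc (top : List Int) (s : Int)
    (h : top.Pairwise (fun a b => b ≤ a)) :
    PySem.List.sorted (top ++ [s]) (fun x => x) true = (insAsc top.reverse s).reverse := by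
  have h2 : ((insAsc top.reverse s).reverse).Perm (top ++ [s]) := by
    refine ((insAsc top.reverse s).reverse_perm.trans ?_)
    refine (insAsc_perm top.reverse s).trans ?_
    exact (top.reverse_perm.cons s).trans (List.perm_append_singleton s top).symm
  apply PySem.List.eq_of_perm_of_pairwise_le_of_injective (key := fun x : Int => -x)
    neg_injective
  · exact (PySem.List.sorted_perm _ _ _).trans h2.symm
  · exact (PySem.List.sorted_pairwise_rev (xs := top ++ [s]) (key := fun x : Int => x)).imp
      (fun hab => by omega)
  · rw [List.pairwise_reverse]
    exact (insAsc_pairwise top.reverse s (by rwa [List.pairwise_reverse])).imp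
      (fun hab => by omega)

lemma tail_reverse_eq (l : List Int) : l.reverse.tail = l.dropLast.reverse := by
  induction l using List.reverseRecOn with
  | nil => rfl
  | append_singleton xs x ih => simp

lemma getD_pyGet_neg_one (l : List Int) (h : l ≠ []) :
    (PySem.List.pyGet? l (-1)).getD 0 = l.reverse.headD 0 := by
  induction l using List.reverseRecOn with
  | nil => simp at h
  | append_singleton xs x ih =>
    simp [PySem.List.pyGet?, PySem.List.pyIdx?]

lemma loop_eq (k : Int) (hk : 1 ≤ k) (score : List Int) :
    ∀ (ans top : List Int), top.Pairwise (fun a b => b ≤ a) → (top.length : Int) ≤ k →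
    (score.foldl (stepA k) (ans, top)).1 = (score.foldl (stepB k) (ans, top.reverse)).1 := by
  induction score with
  | nil => intro ans top _ _; rfl
  | cons s rest ih =>
    intro ans top hsort hlen
    have hins := sorted_rev_eq_insAsc top s hsort
    have hself : PySem.List.insert top.reverse
        ((bisectLoop top.reverse s 0 top.reverse.length : Nat) : Int) s = insAsc top.reverse s :=
      insert_eq_insAsc top.reverse s (by rwa [List.pairwise_reverse])
    have hlen1 : (insAsc top.reverse s).length = top.length + 1 := by
      have := (insAsc_perm top.reverse s).length_eq
      simp at this
      exact this
    have hslen : (PySem.List.sorted (top ++ [s]) (fun x => x) true).length = top.length + 1 := by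
      simp
    by_cases hov : k < ((insAsc top.reverse s).length : Int)
    · -- overflow: the new list has length k+1; A keeps the first k, B pops the head
      have hkNat : top.length = k.toNat := by omega
      have htake : PySem.List.slice (PySem.List.sorted (top ++ [s]) (fun x => x) true) none (some k) =
          (PySem.List.sorted (top ++ [s]) (fun x => x) true).dropLast := by
        have hk' : k = ((k.toNat : Nat) : Int) := by omega
        rw [hk', PySem.List.slice_to_natCast, List.dropLast_eq_take]
        congr 1
        omega
      have hd : (PySem.List.sorted (top ++ [s]) (fun x => x) true).dropLast.reverse
          = (insAsc top.reverse s).tail := by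
        rw [← tail_reverse_eq, hins, List.reverse_reverse]
      have hnil : (PySem.List.sorted (top ++ [s]) (fun x => x) true).dropLast ≠ [] :=
        List.ne_nil_of_length_pos (by rw [List.length_dropLast, hslen]; omega)
      simp only [List.foldl_cons, stepA, stepB, hself, hov, if_pos, htake]
      rw [ih (ans ++ [_]) (PySem.List.sorted (top ++ [s]) (fun x => x) true).dropLast
        ((PySem.List.sorted_pairwise_rev (xs := top ++ [s]) (key := fun x : Int => x)).sublist
          (List.dropLast_sublist _)) (by rw [List.length_dropLast]; omega)]
      rw [getD_pyGet_neg_one _ hnil, hd]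
    · -- no overflow: the slice keeps everything, B keeps everything
      have htake : PySem.List.slice (PySem.List.sorted (top ++ [s]) (fun x => x) true) none (some k) =
          PySem.List.sorted (top ++ [s]) (fun x => x) true := by
        have hk' : k = ((k.toNat : Nat) : Int) := by omega
        rw [hk', PySem.List.slice_to_natCast]
        exact List.take_of_length_le (by omega)
      have hnil : PySem.List.sorted (top ++ [s]) (fun x => x) true ≠ [] := by
        intro hcon; rw [PySem.List.sorted_eq_nil_iff] at hcon; simp at hcon
      simp only [List.foldl_cons, stepA, stepB, hself, if_neg hov, htake]
      rw [ih (ans ++ [_]) (PySem.List.sorted (top ++ [s]) (fun x => x) true)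
        (PySem.List.sorted_pairwise_rev (xs := top ++ [s]) (key := fun x : Int => x)) (by omega)]
      rw [getD_pyGet_neg_one _ hnil, hins, List.reverse_reverse]

-- ===== VERDICT (by name: the statement is the Claim_ definition above) =====
theorem solution_spec : Claim_equal_solution := by
  intro k score _ hpre
  unfold Spec_solution solution solution_alt
  rcases hpre with h | hk
  · subst h; rfl
  · exact loop_eq k hk score [] [] (by simp) (by simp; omega)
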